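-- pv_equiv track=rewrite | github.com/Im2ql4u/Thesis | scripts/cgsr_campaign.py | extract_n_omega
-- ===== SOURCE A (Python) =====
-- def extract_n_omega(cmd: list[str]) -> tuple[str, str]:
--     n = omega = "?"
--     for i, flag in enumerate(cmd):
--         if flag == "--n-elec" and i + 1 < len(cmd):
--             n = cmd[i + 1]
--         if flag == "--omega" and i + 1 < len(cmd):
--             omega = cmd[i + 1]
--     return n, omega
-- ===== SOURCE B (Python) =====
-- def extract_n_omega(cmd: list[str]) -> tuple[str, str]:
--     def last_value(flag: str) -> str:
--         # search backwards; the first match from the right is A's last-write winner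
--         for j in range(len(cmd) - 2, -1, -1):
--             if cmd[j] == flag:
--                 return cmd[j + 1]
--         return "?"
--     return last_value("--n-elec"), last_value("--omega")
-- ===== Notes on version B (the rewrite author's own statement) =====
-- stated objective: alternative
-- what changed: Replaces A's single forward scan that keeps overwriting two accumulators with two backward searches that early-exit at the first match from the right (no accumulator, no full traversal once found).
import Mathlib
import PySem

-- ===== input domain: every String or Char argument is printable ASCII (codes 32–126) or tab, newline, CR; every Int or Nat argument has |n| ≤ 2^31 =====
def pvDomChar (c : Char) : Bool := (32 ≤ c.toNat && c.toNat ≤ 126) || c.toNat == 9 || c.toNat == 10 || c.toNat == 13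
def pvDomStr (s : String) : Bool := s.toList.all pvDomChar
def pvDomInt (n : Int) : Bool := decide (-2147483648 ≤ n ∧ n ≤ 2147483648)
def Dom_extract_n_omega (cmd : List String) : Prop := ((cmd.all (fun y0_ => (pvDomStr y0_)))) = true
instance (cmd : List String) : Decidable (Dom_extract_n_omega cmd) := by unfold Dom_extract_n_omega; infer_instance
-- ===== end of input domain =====

-- B replaces A's forward overwrite-scan with two backward early-exit searches
-- (first match from the right); objective: alternative.

-- ===== PORT A =====
def extract_n_omega (cmd : List String) : String × String :=
  (PySem.List.enumerate cmd).foldl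
    (fun st p =>
      let st1 := if p.2 = "--n-elec" ∧ p.1 + 1 < (cmd.length : Int)
                 then (PySem.List.pyGetD cmd (p.1 + 1) st.1, st.2) else st
      if p.2 = "--omega" ∧ p.1 + 1 < (cmd.length : Int)
      then (st1.1, PySem.List.pyGetD cmd (p.1 + 1) st1.2) else st1)
    ("?", "?")

-- ===== PORT B =====
-- last_value(flag): 'for j in range(len(cmd)-2, -1, -1): if cmd[j] == flag: return cmd[j+1]'
-- ported as findSome? over the countdown range (early return = first some); both indices
-- j and j+1 are in range on every iteration, so pyGetD's default is never used.
def pvLastValue (cmd : List String) (flag : String) : String :=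
  match (PySem.List.pyRange ((cmd.length : Int) - 2) (-1) (-1)).findSome?
      (fun j => if PySem.List.pyGetD cmd j "" = flag
                then some (PySem.List.pyGetD cmd (j + 1) "") else none) with
  | some v => v
  | none => "?"

def extract_n_omega_alt (cmd : List String) : String × String :=
  (pvLastValue cmd "--n-elec", pvLastValue cmd "--omega")

-- ===== PRECONDITION & SPEC =====
def Spec_extract_n_omega (cmd : List String) (out : String × String) : Prop := out = extract_n_omega_alt cmd
instance (cmd : List String) (out : String × String) : Decidable (Spec_extract_n_omega cmd out) := by unfold Spec_extract_n_omega; infer_instance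

-- ===== CLAIM =====
def Claim_equal_extract_n_omega : Prop := ∀ (cmd : List String), Dom_extract_n_omega cmd → Spec_extract_n_omega cmd (extract_n_omega cmd)

-- ===== LEMMAS AND PROOFS =====

-- A's loop body at index i (guards written out), beta-equal to the folded function in port A
def pvStepA (cmd : List String) (st : String × String) (i : Int) : String × String :=
  let st1 := if PySem.List.pyGetD cmd i "" = "--n-elec" ∧ i + 1 < (cmd.length : Int)
             then (PySem.List.pyGetD cmd (i + 1) st.1, st.2) else st
  if PySem.List.pyGetD cmd i "" = "--omega" ∧ i + 1 < (cmd.length : Int)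
  then (st1.1, PySem.List.pyGetD cmd (i + 1) st1.2) else st1

-- the same body with the (always-true, for i < len-1) bound guards removed and defaults normalised
def pvStep (cmd : List String) (st : String × String) (i : Int) : String × String :=
  let st1 := if PySem.List.pyGetD cmd i "" = "--n-elec"
             then (PySem.List.pyGetD cmd (i + 1) "", st.2) else st
  if PySem.List.pyGetD cmd i "" = "--omega"
  then (st1.1, PySem.List.pyGetD cmd (i + 1) "") else st1

-- B's per-index test
def pvF (cmd : List String) (flag : String) (j : Int) : Option String :=
  if PySem.List.pyGetD cmd j "" = flag
  then some (PySem.List.pyGetD cmd (j + 1) "") else none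

theorem pvStep_fst (cmd : List String) (st : String × String) (i : Int) :
    (pvStep cmd st i).1
    = if PySem.List.pyGetD cmd i "" = "--n-elec"
      then PySem.List.pyGetD cmd (i + 1) "" else st.1 := by
  simp only [pvStep]; split_ifs with h1 h2 <;> simp_all

theorem pvStep_snd (cmd : List String) (st : String × String) (i : Int) :
    (pvStep cmd st i).2
    = if PySem.List.pyGetD cmd i "" = "--omega"
      then PySem.List.pyGetD cmd (i + 1) "" else st.2 := by
  simp only [pvStep]; split_ifs with h1 h2 <;> simp_all

-- Last write of a forward fold = first hit of a backward search.
theorem pv_fold_fst (cmd : List String) (l : List Int) :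
    ∀ st : String × String,
    (l.foldl (pvStep cmd) st).1
    = (l.reverse.findSome? (pvF cmd "--n-elec")).getD st.1 := by
  induction l with
  | nil => intro st; simp
  | cons i l ih =>
    intro st
    rw [List.foldl_cons, ih, List.reverse_cons, List.findSome?_append]
    cases h : l.reverse.findSome? (pvF cmd "--n-elec") with
    | some v => simp
    | none =>
      simp only [Option.none_or, Option.getD]
      rw [pvStep_fst]
      simp only [pvF, List.findSome?]
      split_ifs <;> simp

theorem pv_fold_snd (cmd : List String) (l : List Int) :
    ∀ st : String × String,
    (l.foldl (pvStep cmd) st).2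
    = (l.reverse.findSome? (pvF cmd "--omega")).getD st.2 := by
  induction l with
  | nil => intro st; simp
  | cons i l ih =>
    intro st
    rw [List.foldl_cons, ih, List.reverse_cons, List.findSome?_append]
    cases h : l.reverse.findSome? (pvF cmd "--omega") with
    | some v => simp
    | none =>
      simp only [Option.none_or, Option.getD]
      rw [pvStep_snd]
      simp only [pvF, List.findSome?]
      split_ifs <;> simp

-- B's helper as a getD over the reversed forward range
theorem pv_lastValue_eq (cmd : List String) (flag : String) :
    pvLastValue cmd flag
    = (((PySem.List.pyRange 0 ((cmd.length : Int) - 1) 1).reverse).findSome?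
        (pvF cmd flag)).getD "?" := by
  unfold pvLastValue
  rw [PySem.List.pyRange_neg_one_eq_reverse]
  have h1 : ((-1 : Int) + 1) = 0 := by ring
  have h2 : ((cmd.length : Int) - 2 + 1) = (cmd.length : Int) - 1 := by ring
  rw [h1, h2]
  have hf : (fun j => if PySem.List.pyGetD cmd j "" = flag
                then some (PySem.List.pyGetD cmd (j + 1) "") else none) = pvF cmd flag := rfl
  rw [hf]
  cases ((PySem.List.pyRange 0 ((cmd.length : Int) - 1) 1).reverse).findSome? (pvF cmd flag) <;> rfl

-- the last index len-1 leaves A's state unchanged (both bound guards fail)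
theorem pv_last (cmd : List String) (st : String × String) :
    pvStepA cmd st ((cmd.length : Int) - 1) = st := by
  have hc : ¬ ((cmd.length : Int) - 1 + 1 < (cmd.length : Int)) := by omega
  simp only [pvStepA]
  rw [if_neg (fun h => hc h.2), if_neg (fun h => hc h.2)]

-- inside range(len-1) the guards hold and the defaults are irrelevant
theorem pv_stepA_eq_step (cmd : List String) (x : Int) (hx0 : 0 ≤ x)
    (hx : x < (cmd.length : Int) - 1) (st : String × String) :
    pvStepA cmd st x = pvStep cmd st x := by
  have hx2 : x + 1 < (cmd.length : Int) := by omega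
  have key : ∀ dfl : String, PySem.List.pyGetD cmd (x + 1) dfl
      = cmd[(x + 1).toNat]'(by omega) :=
    fun dfl => PySem.List.pyGetD_eq_getElem cmd dfl (by omega) hx2
  simp only [pvStepA, pvStep, hx2, and_true, key]

-- port A's fold is (definitionally) a fold of pvStepA over the index range
theorem pv_A_eq (cmd : List String) :
    extract_n_omega cmd
    = (PySem.List.pyRange 0 (PySem.List.len cmd) 1).foldl (pvStepA cmd) ("?", "?") := by
  unfold extract_n_omega
  rw [PySem.List.enumerate_eq_map_pyRange cmd "", List.foldl_map]
  rfl

-- ===== VERDICT =====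
theorem extract_n_omega_spec : Claim_equal_extract_n_omega := by
  intro cmd _
  unfold Spec_extract_n_omega
  rcases eq_or_ne cmd [] with rfl | hne
  · decide
  · have hL : 1 ≤ (cmd.length : Int) := by
      have := List.length_pos_iff.mpr hne; omega
    have hlen : PySem.List.len cmd = (cmd.length : Int) := by simp
    rw [pv_A_eq, hlen]
    rw [PySem.List.pyRange_one_append 0 ((cmd.length : Int) - 1) (cmd.length : Int)
      (by omega) (by omega), List.foldl_append]
    have hsingle : PySem.List.pyRange ((cmd.length : Int) - 1) (cmd.length : Int) 1
        = [(cmd.length : Int) - 1] := by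
      have := PySem.List.pyRange_one_singleton ((cmd.length : Int) - 1)
      simpa using this
    rw [hsingle, List.foldl_cons, List.foldl_nil, pv_last]
    rw [PySem.List.foldl_congr_mem _ _ (pvStep cmd) _
      (fun acc x hx => by
        have hb := PySem.List.mem_pyRange_one.mp hx
        exact pv_stepA_eq_step cmd x hb.1 hb.2 acc)]
    unfold extract_n_omega_alt
    rw [pv_lastValue_eq, pv_lastValue_eq]
    exact Prod.ext (pv_fold_fst cmd _ _) (pv_fold_snd cmd _ _)
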